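-- pv_equiv track=rewrite | github.com/DasLab/pyFold-1D | utils/conformation_utils.py | parse_out_chainbreak
-- ===== SOURCE A (Python) =====
-- def parse_out_chainbreak(secstruct):
-- 	secstruct_new = []
-- 	is_chainbreak = []
--
-- 	for char in secstruct:
-- 		if char in [',','+',' ','&']:
-- 			if len(is_chainbreak)>0:
-- 				is_chainbreak[-1] = 1
-- 		else:
-- 			secstruct_new.append(char)
-- 			is_chainbreak.append(0)
-- 	return is_chainbreak, ''.join(secstruct_new)
-- ===== SOURCE B (Python) =====
-- def parse_out_chainbreak(secstruct):
--     # Pass 1: split into segments at every separator character.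
--     segs = []
--     cur = ''
--     for ch in secstruct:
--         if ch in ',+ &':
--             segs.append(cur)
--             cur = ''
--         else:
--             cur += ch
--     segs.append(cur)
--     # Pass 2: each non-last, non-empty segment ends in a chainbreak.
--     is_chainbreak = []
--     for seg in segs[:-1]:
--         if seg:
--             is_chainbreak.extend([0] * (len(seg) - 1) + [1])
--     is_chainbreak.extend([0] * len(segs[-1]))
--     return is_chainbreak, ''.join(segs)
-- ===== Notes on version B (the rewrite author's own statement) =====
-- stated objective: alternative
-- what changed: B first splits the string into segments at separator characters, then emits the chainbreak flags per segment (1 at the end of every non-last non-empty segment), instead of A's single pass that mutates the last flag in place on each separator.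
import Mathlib
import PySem

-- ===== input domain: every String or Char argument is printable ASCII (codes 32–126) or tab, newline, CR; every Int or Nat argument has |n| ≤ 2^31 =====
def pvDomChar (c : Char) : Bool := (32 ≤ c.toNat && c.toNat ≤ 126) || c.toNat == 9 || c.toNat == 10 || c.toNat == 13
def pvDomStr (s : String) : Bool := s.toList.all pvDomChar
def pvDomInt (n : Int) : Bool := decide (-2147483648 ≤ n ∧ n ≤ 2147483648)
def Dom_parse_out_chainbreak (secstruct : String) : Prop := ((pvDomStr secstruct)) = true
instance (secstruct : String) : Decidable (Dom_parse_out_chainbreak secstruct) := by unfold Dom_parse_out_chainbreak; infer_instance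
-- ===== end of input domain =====

-- B splits at separators first and emits flags per segment instead of A's in-place mutation of the last flag; alternative decomposition, same cost.

-- ===== PORT A =====
-- loop body of A: separator → set last flag to 1 (if any); else append char and flag 0
def pvStepA (st : List Char × List Int) (ch : Char) : List Char × List Int :=
  if ch = ',' || ch = '+' || ch = ' ' || ch = '&' then
    if st.2.length > 0 then (st.1, st.2.dropLast ++ [1]) else st
  else (st.1 ++ [ch], st.2 ++ [0])

def parse_out_chainbreak (secstruct : String) : List Int × String :=
  let r := secstruct.toList.foldl pvStepA ([], [])
  (r.2, String.ofList r.1)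

-- ===== PORT B =====
def pvSep (ch : Char) : Bool := ch = ',' || ch = '+' || ch = ' ' || ch = '&'

-- loop body of B's pass 1: separator → close current segment; else extend it
def pvStepB (st : List (List Char) × List Char) (ch : Char) : List (List Char) × List Char :=
  if pvSep ch then (st.1 ++ [st.2], []) else (st.1, st.2 ++ [ch])

-- flags contributed by one non-last segment (B's pass-2 loop body)
def pvSegFlags (seg : List Char) : List Int :=
  if seg.isEmpty then [] else List.replicate (seg.length - 1) 0 ++ [1]

def parse_out_chainbreak_alt (secstruct : String) : List Int × String :=
  let r := secstruct.toList.foldl pvStepB ([], [])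
  let segs := r.1 ++ [r.2]
  let flags := segs.dropLast.foldl (fun acc seg => acc ++ pvSegFlags seg) []
                 ++ List.replicate (segs.getLast?.getD []).length 0
  (flags, String.ofList segs.flatten)

-- ===== PRECONDITION & SPEC =====
def Spec_parse_out_chainbreak (secstruct : String) (out : List Int × String) : Prop := out = parse_out_chainbreak_alt secstruct
instance (secstruct : String) (out : List Int × String) : Decidable (Spec_parse_out_chainbreak secstruct out) := by unfold Spec_parse_out_chainbreak; infer_instance

-- ===== CLAIM (what is proved, stated in full; the proofs are below) =====
def Claim_equal_parse_out_chainbreak : Prop := ∀ (secstruct : String), Dom_parse_out_chainbreak secstruct → Spec_parse_out_chainbreak secstruct (parse_out_chainbreak secstruct)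

-- ===== LEMMAS AND PROOFS =====

-- reference splitter (proof helper): segments of l, as B's pass 1 produces them
def pvSplitSegs : List Char → List (List Char)
  | [] => [[]]
  | c :: rest =>
    let segs := pvSplitSegs rest
    if pvSep c then [] :: segs
    else match segs with
      | s :: ss => (c :: s) :: ss
      | [] => [[c]]

-- flags as B's pass 2 computes them from a segment list
def pvBflags (segs : List (List Char)) : List Int :=
  segs.dropLast.foldl (fun acc seg => acc ++ pvSegFlags seg) []
    ++ List.replicate (segs.getLast?.getD []).length 0

-- chainbreak list produced by A's loop after the last already-emitted flag b
def pvFchain : Int → List Char → List Int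
  | b, [] => [b]
  | b, c :: l => if pvSep c then pvFchain 1 l else b :: pvFchain 0 l

def pvSepHead : List Char → Bool
  | [] => false
  | c :: _ => pvSep c

theorem pvSplitSegs_ne_nil (l : List Char) : pvSplitSegs l ≠ [] := by
  cases l with
  | nil => simp [pvSplitSegs]
  | cons c rest =>
    simp only [pvSplitSegs]
    split
    · simp
    · cases h : pvSplitSegs rest <;> simp

theorem pvFoldl_app (f : List Char → List Int) (l : List (List Char)) (a : List Int) :
    l.foldl (fun acc seg => acc ++ f seg) a = a ++ l.foldl (fun acc seg => acc ++ f seg) [] := by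
  induction l generalizing a with
  | nil => simp
  | cons s ss ih =>
    simp only [List.foldl_cons]
    rw [ih (a ++ f s), ih (([] : List Int) ++ f s)]
    simp

theorem pvBflags_cons (s : List Char) (ss : List (List Char)) (h : ss ≠ []) :
    pvBflags (s :: ss) = pvSegFlags s ++ pvBflags ss := by
  obtain ⟨u, us, rfl⟩ := List.exists_cons_of_ne_nil h
  unfold pvBflags
  rw [List.dropLast_cons_of_ne_nil (by simp), List.getLast?_cons_cons]
  simp only [List.foldl_cons, List.nil_append]
  rw [pvFoldl_app]
  simp

theorem pvBflags_nil_cons (ss : List (List Char)) (h : ss ≠ []) :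
    pvBflags ([] :: ss) = pvBflags ss := by
  rw [pvBflags_cons _ _ h]; simp [pvSegFlags]

theorem pvBflags_single (s : List Char) :
    pvBflags [s] = List.replicate s.length 0 := by
  simp [pvBflags]

theorem pvBcons (c : Char) (l : List Char) (h : pvSep c = false) :
    pvBflags (pvSplitSegs (c :: l)) =
      (if pvSepHead l then 1 else 0) :: pvBflags (pvSplitSegs l) := by
  cases l with
  | nil =>
    simp [pvSplitSegs, h, pvSepHead, pvBflags, pvSegFlags]
  | cons d t =>
    by_cases hd : pvSep d
    · have hne := pvSplitSegs_ne_nil t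
      have h1 : pvSplitSegs (d :: t) = [] :: pvSplitSegs t := by
        simp [pvSplitSegs, hd]
      have h2 : pvSplitSegs (c :: d :: t) = [c] :: pvSplitSegs t := by
        simp [pvSplitSegs, h, hd]
      rw [h1, h2, pvBflags_cons _ _ hne, pvBflags_nil_cons _ hne]
      simp [pvSepHead, hd, pvSegFlags]
    · cases hS : pvSplitSegs (d :: t) with
      | nil => exact absurd hS (pvSplitSegs_ne_nil _)
      | cons s ss =>
        have h2 : pvSplitSegs (c :: d :: t) = (c :: s) :: ss := by
          simp only [pvSplitSegs] at hS ⊢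
          rw [hS]; simp [h]
        rw [h2]
        -- s is nonempty: first char of d::t is non-separator, so s = d :: …
        have hs : ∃ s', s = d :: s' := by
          simp only [pvSplitSegs, hd, if_false, Bool.false_eq_true] at hS
          cases h3 : pvSplitSegs t with
          | nil => exact absurd h3 (pvSplitSegs_ne_nil _)
          | cons a b =>
            rw [h3] at hS
            simp at hS
            exact ⟨a, hS.1.symm⟩
        obtain ⟨s', rfl⟩ := hs
        simp only [pvSepHead, hd, if_false, Bool.false_eq_true]
        cases ss with
        | nil =>
          rw [pvBflags_single, pvBflags_single]
          simp [List.replicate]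
        | cons u us =>
          rw [pvBflags_cons (c :: d :: s') (u :: us) (by simp),
              pvBflags_cons (d :: s') (u :: us) (by simp)]
          simp [pvSegFlags, List.replicate_succ]

theorem pvFB (l : List Char) (b : Int) :
    pvFchain b l = (if pvSepHead l then 1 else b) :: pvBflags (pvSplitSegs l) := by
  induction l generalizing b with
  | nil => simp [pvFchain, pvSepHead, pvSplitSegs, pvBflags, pvSegFlags]
  | cons c l ih =>
    by_cases hc : pvSep c
    · simp only [pvFchain, hc, if_true, pvSepHead]
      rw [ih 1]
      have h1 : pvSplitSegs (c :: l) = [] :: pvSplitSegs l := by simp [pvSplitSegs, hc]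
      rw [h1, pvBflags_nil_cons _ (pvSplitSegs_ne_nil l)]
      split <;> rfl
    · simp only [pvFchain, hc, pvSepHead, Bool.false_eq_true, if_false]
      rw [ih 0, pvBcons c l (by simp [hc])]

theorem pvFoldlA (l : List Char) (cs : List Char) (bs : List Int) (b : Int) :
    l.foldl pvStepA (cs, bs ++ [b]) =
      (cs ++ (pvSplitSegs l).flatten, bs ++ pvFchain b l) := by
  induction l generalizing cs bs b with
  | nil => simp [pvSplitSegs, pvFchain]
  | cons c l ih =>
    by_cases hc : pvSep c
    · have hstep : pvStepA (cs, bs ++ [b]) c = (cs, bs ++ [1]) := by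
        simp only [pvStepA]
        have : (c = ',' || c = '+' || c = ' ' || c = '&') = true := hc
        simp [this]
      simp only [List.foldl_cons, hstep]
      rw [ih cs bs 1]
      simp [pvSplitSegs, hc, pvFchain]
    · have hstep : pvStepA (cs, bs ++ [b]) c = (cs ++ [c], (bs ++ [b]) ++ [0]) := by
        simp only [pvStepA]
        have : (c = ',' || c = '+' || c = ' ' || c = '&') = false := by
          simpa [pvSep] using hc
        simp [this]
      simp only [List.foldl_cons, hstep]
      rw [ih (cs ++ [c]) (bs ++ [b]) 0]
      have hflat : (pvSplitSegs (c :: l)).flatten = c :: (pvSplitSegs l).flatten := by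
        cases hS : pvSplitSegs l with
        | nil => exact absurd hS (pvSplitSegs_ne_nil _)
        | cons s ss => simp [pvSplitSegs, hc, hS]
      rw [hflat]
      simp [pvFchain, hc]

theorem pvMainA (l : List Char) :
    l.foldl pvStepA ([], []) = ((pvSplitSegs l).flatten, pvBflags (pvSplitSegs l)) := by
  induction l with
  | nil => simp [pvSplitSegs, pvBflags, pvSegFlags]
  | cons c l ih =>
    by_cases hc : pvSep c
    · have hstep : pvStepA (([] : List Char), ([] : List Int)) c = ([], []) := by
        simp only [pvStepA]
        have h1 : (c = ',' || c = '+' || c = ' ' || c = '&') = true := hc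
        simp [h1]
      simp only [List.foldl_cons, hstep, ih]
      rw [show pvSplitSegs (c :: l) = [] :: pvSplitSegs l from by simp [pvSplitSegs, hc],
          pvBflags_nil_cons _ (pvSplitSegs_ne_nil l)]
      simp
    · have hstep : pvStepA (([] : List Char), ([] : List Int)) c = ([c], [] ++ [(0 : Int)]) := by
        simp only [pvStepA]
        have h1 : (c = ',' || c = '+' || c = ' ' || c = '&') = false := by
          simpa [pvSep] using hc
        simp [h1]
      simp only [List.foldl_cons, hstep]
      rw [pvFoldlA l [c] [] 0, pvFB l 0, pvBcons c l (by simp [hc])]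
      have hflat : (pvSplitSegs (c :: l)).flatten = c :: (pvSplitSegs l).flatten := by
        cases hS : pvSplitSegs l with
        | nil => exact absurd hS (pvSplitSegs_ne_nil _)
        | cons s ss => simp [pvSplitSegs, hc, hS]
      rw [hflat]
      simp

-- B's pass 1 builds exactly pvSplitSegs
theorem pvFoldlB (l : List Char) (segs : List (List Char)) (cur : List Char) :
    (let r := l.foldl pvStepB (segs, cur); r.1 ++ [r.2]) =
      segs ++ (match pvSplitSegs l with
               | s :: ss => (cur ++ s) :: ss
               | [] => [cur]) := by
  induction l generalizing segs cur with
  | nil => simp [pvSplitSegs]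
  | cons c l ih =>
    by_cases hc : pvSep c
    · have hstep : pvStepB (segs, cur) c = (segs ++ [cur], []) := by simp [pvStepB, hc]
      simp only [List.foldl_cons, hstep]
      rw [ih (segs ++ [cur]) []]
      cases hS : pvSplitSegs l with
      | nil => exact absurd hS (pvSplitSegs_ne_nil _)
      | cons s ss => simp [pvSplitSegs, hc, hS]
    · have hstep : pvStepB (segs, cur) c = (segs, cur ++ [c]) := by simp [pvStepB, hc]
      simp only [List.foldl_cons, hstep]
      rw [ih segs (cur ++ [c])]
      cases hS : pvSplitSegs l with
      | nil => exact absurd hS (pvSplitSegs_ne_nil _)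
      | cons s ss => simp [pvSplitSegs, hc, hS]

theorem pvMainB (l : List Char) :
    (let r := l.foldl pvStepB ([], []); r.1 ++ [r.2]) = pvSplitSegs l := by
  rw [pvFoldlB l [] []]
  cases hS : pvSplitSegs l with
  | nil => exact absurd hS (pvSplitSegs_ne_nil _)
  | cons s ss => simp

-- ===== VERDICT (by name: the statement is the Claim_ definition above) =====
theorem parse_out_chainbreak_spec : Claim_equal_parse_out_chainbreak := by
  intro s _
  unfold Spec_parse_out_chainbreak parse_out_chainbreak parse_out_chainbreak_alt
  have hB := pvMainB s.toList
  simp only at hB ⊢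
  rw [pvMainA s.toList, hB]
  rfl
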